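-- pv_equiv track=rewrite | github.com/paiml/depyler | examples/test_collections_import.py | process_queue_alt
-- ===== SOURCE A (Python) =====
-- def process_queue_alt(items: list[int]) -> list[int]:
--     """Process items alternating pop-front / pop-back based on remaining size."""
--     buf: list[int] = []
--     k: int = 0
--     while k < len(items):
--         v: int = items[k]
--         buf.append(v)
--         k = k + 1
--     results: list[int] = []
--     while len(buf) > 0:
--         remaining: int = len(buf)
--         if remaining % 2 == 0:
--             first: int = buf[0]
--             results.append(first)
--             new_buf: list[int] = []
--             m: int = 1
--             while m < len(buf):
--                 bv: int = buf[m]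
--                 new_buf.append(bv)
--                 m = m + 1
--             buf = new_buf
--         else:
--             last_idx: int = len(buf) - 1
--             last: int = buf[last_idx]
--             results.append(last)
--             trimmed: list[int] = []
--             n: int = 0
--             while n < last_idx:
--                 tv: int = buf[n]
--                 trimmed.append(tv)
--                 n = n + 1
--             buf = trimmed
--     return results
-- ===== SOURCE B (Python) =====
-- def process_queue_alt(items: list[int]) -> list[int]:
--     """Two-pointer version: same alternating front/back order, no list copying."""
--     out: list[int] = []
--     lo: int = 0
--     hi: int = len(items) - 1
--     while lo <= hi:
--         if (hi - lo + 1) % 2 == 0: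
--             out.append(items[lo])
--             lo = lo + 1
--         else:
--             out.append(items[hi])
--             hi = hi - 1
--     return out
-- ===== Notes on version B (the rewrite author's own statement) =====
-- stated objective: faster
-- what changed: B replaces A's repeated O(n) list rebuilds (copying the buffer minus one element on every pop) with two index pointers into the original list, deciding front/back by the parity of hi-lo+1, so each element is emitted in O(1).
import Mathlib
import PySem

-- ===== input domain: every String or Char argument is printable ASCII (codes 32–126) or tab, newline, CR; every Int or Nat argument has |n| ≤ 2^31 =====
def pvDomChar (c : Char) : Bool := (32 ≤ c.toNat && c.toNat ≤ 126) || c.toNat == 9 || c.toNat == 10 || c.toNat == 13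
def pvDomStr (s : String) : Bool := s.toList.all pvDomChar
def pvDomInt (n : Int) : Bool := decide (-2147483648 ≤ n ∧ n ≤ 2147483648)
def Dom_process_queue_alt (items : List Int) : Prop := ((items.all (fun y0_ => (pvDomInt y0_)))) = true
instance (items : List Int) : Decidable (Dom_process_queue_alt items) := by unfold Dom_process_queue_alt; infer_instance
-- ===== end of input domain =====

-- B is a two-pointer rewrite of A (O(n) instead of A's O(n^2) list rebuilds); same output.
-- Loops are ported as structural recursion on a fuel argument that provably dominates the
-- iteration count, so the ports reduce structurally; each loop body is its Python's, step for step.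

-- ===== PORT A =====
-- first while loop: copy items into buf (fuel = items.length suffices)
def pqA_copy (items : List Int) : Nat → Nat → List Int → List Int
  | 0, _, buf => buf
  | fuel + 1, k, buf =>
    if k < items.length then pqA_copy items fuel (k + 1) (buf ++ [items.getD k 0]) else buf

-- inner while loop of the even branch: copy buf[1:] element by element
def pqA_tail (buf : List Int) : Nat → Nat → List Int → List Int
  | 0, _, acc => acc
  | fuel + 1, m, acc =>
    if m < buf.length then pqA_tail buf fuel (m + 1) (acc ++ [buf.getD m 0]) else acc

-- inner while loop of the odd branch: copy buf[0:last_idx] element by element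
def pqA_trim (buf : List Int) (stop : Nat) : Nat → Nat → List Int → List Int
  | 0, _, acc => acc
  | fuel + 1, n, acc =>
    if n < stop then pqA_trim buf stop fuel (n + 1) (acc ++ [buf.getD n 0]) else acc

-- second while loop of A (each iteration shrinks buf by one, so fuel = buf.length suffices)
def pqA_main : Nat → List Int → List Int → List Int
  | 0, _, results => results
  | fuel + 1, buf, results =>
    if buf.length > 0 then
      if buf.length % 2 == 0 then
        pqA_main fuel (pqA_tail buf buf.length 1 []) (results ++ [buf.getD 0 0])
      else
        pqA_main fuel (pqA_trim buf (buf.length - 1) buf.length 0 [])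
          (results ++ [buf.getD (buf.length - 1) 0])
    else results

def process_queue_alt (items : List Int) : List Int :=
  pqA_main items.length (pqA_copy items items.length 0 []) []

-- ===== PORT B =====
-- the while loop of B (one element is emitted per iteration, so fuel = items.length suffices)
def pqB_loop (items : List Int) : Nat → Int → Int → List Int → List Int
  | 0, _, _, out => out
  | fuel + 1, lo, hi, out =>
    if lo ≤ hi then
      if (hi - lo + 1) % 2 == 0 then
        pqB_loop items fuel (lo + 1) hi (out ++ [items.getD lo.toNat 0])
      else
        pqB_loop items fuel lo (hi - 1) (out ++ [items.getD hi.toNat 0])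
    else out

def process_queue_alt_alt (items : List Int) : List Int :=
  pqB_loop items items.length 0 ((items.length : Int) - 1) []

-- ===== PRECONDITION & SPEC =====
def Spec_process_queue_alt (items : List Int) (out : List Int) : Prop := out = process_queue_alt_alt items
instance (items : List Int) (out : List Int) : Decidable (Spec_process_queue_alt items out) := by unfold Spec_process_queue_alt; infer_instance

-- ===== CLAIM (what is proved, stated in full; the proofs are below) =====
def Claim_equal_process_queue_alt : Prop := ∀ (items : List Int), Dom_process_queue_alt items → Spec_process_queue_alt items (process_queue_alt items)

-- ===== LEMMAS AND PROOFS =====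

-- the common mathematical core: pop front if even length, back if odd
def coreF (buf : List Int) : List Int :=
  if h : buf.length > 0 then
    if buf.length % 2 == 0 then
      buf.getD 0 0 :: coreF (buf.drop 1)
    else
      buf.getD (buf.length - 1) 0 :: coreF (buf.take (buf.length - 1))
  else []
termination_by buf.length
decreasing_by all_goals simp; omega

theorem pqA_copy_eq (items : List Int) (fuel k : Nat) (buf : List Int)
    (hf : items.length ≤ fuel + k) :
    pqA_copy items fuel k buf = buf ++ items.drop k := by
  induction fuel generalizing k buf with
  | zero =>
    rw [List.drop_eq_nil_of_le (by omega : items.length ≤ k)]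
    simp [pqA_copy]
  | succ f ih =>
    rw [pqA_copy]
    split
    · rename_i h
      rw [ih (k + 1) _ (by omega), List.append_assoc,
          List.drop_eq_getElem_cons h, List.getD_eq_getElem _ _ h]
      simp
    · rw [List.drop_eq_nil_of_le (by omega)]; simp

theorem pqA_tail_eq (buf : List Int) (fuel m : Nat) (acc : List Int)
    (hf : buf.length ≤ fuel + m) :
    pqA_tail buf fuel m acc = acc ++ buf.drop m := by
  induction fuel generalizing m acc with
  | zero =>
    rw [List.drop_eq_nil_of_le (by omega : buf.length ≤ m)]
    simp [pqA_tail]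
  | succ f ih =>
    rw [pqA_tail]
    split
    · rename_i h
      rw [ih (m + 1) _ (by omega), List.append_assoc,
          List.drop_eq_getElem_cons h, List.getD_eq_getElem _ _ h]
      simp
    · rw [List.drop_eq_nil_of_le (by omega)]; simp

theorem pqA_trim_eq (buf : List Int) (stop fuel n : Nat) (acc : List Int)
    (hs : stop ≤ buf.length) (hf : stop ≤ fuel + n) :
    pqA_trim buf stop fuel n acc = acc ++ (buf.take stop).drop n := by
  induction fuel generalizing n acc with
  | zero =>
    rw [List.drop_eq_nil_of_le (by simp; omega : (buf.take stop).length ≤ n)]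
    simp [pqA_trim]
  | succ f ih =>
    rw [pqA_trim]
    split
    · rename_i h
      have hn : n < (buf.take stop).length := by simp; omega
      rw [ih (n + 1) _ (by omega), List.append_assoc, List.drop_eq_getElem_cons hn]
      have he : (buf.take stop)[n] = buf[n]'(by omega) := List.getElem_take
      rw [he, List.getD_eq_getElem _ _ (by omega)]
      simp
    · rw [List.drop_eq_nil_of_le (by simp; omega)]; simp

theorem pqA_main_eq (fuel : Nat) (buf results : List Int) (hf : buf.length ≤ fuel) :
    pqA_main fuel buf results = results ++ coreF buf := by
  induction fuel generalizing buf results with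
  | zero =>
    have : buf = [] := by
      cases buf with
      | nil => rfl
      | cons a l => simp at hf
    subst this
    simp [pqA_main, coreF]
  | succ f ih =>
    rw [pqA_main, coreF]
    split
    · rename_i h
      split
      · rw [pqA_tail_eq buf _ 1 [] (by omega),
            ih _ _ (by simp; omega), List.append_assoc]
        simp
      · rw [pqA_trim_eq buf _ _ 0 [] (by omega) (by omega),
            ih _ _ (by simp; omega), List.append_assoc]
        simp
    · simp

theorem pqB_eq (items : List Int) (fuel : Nat) (lo hi : Int) (out : List Int)
    (h0 : 0 ≤ lo) (h2 : hi < (items.length : Int)) (hf : (hi + 1 - lo).toNat ≤ fuel) :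
    pqB_loop items fuel lo hi out = out ++ coreF ((items.drop lo.toNat).take (hi + 1 - lo).toNat) := by
  induction fuel generalizing lo hi out with
  | zero =>
    have h0' : (hi + 1 - lo).toNat = 0 := by omega
    rw [h0']
    simp [pqB_loop, coreF]
  | succ f ih =>
    rw [pqB_loop]
    split
    · rename_i hle
      set seg := (items.drop lo.toNat).take (hi + 1 - lo).toNat with hseg
      have hlen : seg.length = (hi + 1 - lo).toNat := by
        rw [hseg, List.length_take, List.length_drop]; omega
      have hpos : seg.length > 0 := by omega
      rw [coreF, dif_pos hpos, hlen]
      have hpar : (((hi - lo + 1) % 2 == 0) = true) ↔ (((hi + 1 - lo).toNat % 2 == 0) = true) := by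
        simp; omega
      split
      · rename_i hev
        rw [if_pos (hpar.mp hev)]
        rw [ih (lo + 1) hi _ (by omega) h2 (by omega)]
        have hdrop : seg.drop 1 = (items.drop (lo + 1).toNat).take (hi + 1 - (lo + 1)).toNat := by
          have e1 : (lo + 1).toNat = lo.toNat + 1 := by omega
          have e2 : (hi + 1 - (lo + 1)).toNat = (hi + 1 - lo).toNat - 1 := by omega
          rw [hseg, List.drop_take, List.drop_drop, e1, e2]
        have hget : seg.getD 0 0 = items.getD lo.toNat 0 := by
          rw [List.getD_eq_getElem?_getD, List.getD_eq_getElem?_getD, hseg,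
              List.getElem?_take_of_lt (by omega), List.getElem?_drop]
          simp
        rw [hdrop, hget, List.append_assoc]; simp
      · rename_i hod
        rw [if_neg (fun hc => hod (hpar.mpr hc))]
        rw [ih lo (hi - 1) _ h0 (by omega) (by omega)]
        have htake : seg.take ((hi + 1 - lo).toNat - 1) = (items.drop lo.toNat).take (hi - 1 + 1 - lo).toNat := by
          rw [hseg, List.take_take]
          congr 1; omega
        have hget : seg.getD ((hi + 1 - lo).toNat - 1) 0 = items.getD hi.toNat 0 := by
          rw [List.getD_eq_getElem?_getD, List.getD_eq_getElem?_getD, hseg,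
              List.getElem?_take_of_lt (by omega), List.getElem?_drop]
          congr 2; omega
        rw [htake, hget, List.append_assoc]; simp
    · rename_i hgt
      have h0' : (hi + 1 - lo).toNat = 0 := by omega
      rw [h0']
      simp [coreF]

-- ===== VERDICT (by name: the statement is the Claim_ definition above) =====
theorem process_queue_alt_spec : Claim_equal_process_queue_alt := by
  intro items _
  unfold Spec_process_queue_alt process_queue_alt process_queue_alt_alt
  rw [pqA_copy_eq items _ 0 [] (by omega),
      pqA_main_eq _ _ _ (by simp),
      pqB_eq items _ 0 _ [] (by omega) (by omega) (by omega)]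
  simp
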